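-- pv_equiv track=rewrite | github.com/adpena/molt | src/molt/stdlib/textwrap.py | dedent
-- ===== SOURCE A (Python) =====
-- def dedent(text: str) -> str:
--     """Remove any common leading whitespace from every line in `text`.
--
--     This can be used to make triple-quoted strings line up with the left
--     edge of the display, while still presenting them in the source code
--     in indented form.
--
--     Note that tabs and spaces are both treated as whitespace, but they
--     are not equal: the lines "  hello" and "\\thello" are
--     considered to have no common leading whitespace.
--
--     Entirely blank lines are normalized to a newline character.
--     """
--     try:
--         lines = text.split("\n")
--     except (AttributeError, TypeError):
--         msg = f"expected str object, not {type(text).__qualname__!r}"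
--         raise TypeError(msg) from None
--
--     non_blank_lines = [line for line in lines if line and not line.isspace()]
--     l1 = min(non_blank_lines, default="")
--     l2 = max(non_blank_lines, default="")
--     margin = 0
--     for margin, c in enumerate(l1):
--         if c != l2[margin] or c not in " \t":
--             break
--
--     return "\n".join([line[margin:] if not line.isspace() else "" for line in lines])
-- ===== SOURCE B (Python) =====
-- def dedent(text: str) -> str:
--     """Remove any common leading whitespace from every line in `text`.
--
--     Computes the margin as the intersection (longest common prefix) of the
--     leading space/tab runs of all non-blank lines, in one pass.
--     """
--     lines = text.split("\n")
--     margin = None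
--     for line in lines:
--         if line and not line.isspace():
--             n = 0
--             while n < len(line) and line[n] in " \t":
--                 n += 1
--             prefix = line[:n]
--             if margin is None:
--                 margin = prefix
--             else:
--                 k = 0
--                 while k < len(margin) and k < len(prefix) and margin[k] == prefix[k]:
--                     k += 1
--                 margin = margin[:k]
--     m = len(margin) if margin is not None else 0
--     return "\n".join("" if line.isspace() else line[m:] for line in lines)
-- ===== Notes on version B (the rewrite author's own statement) =====
-- stated objective: alternative
-- what changed: A computes the margin by comparing only the lexicographic min and max of the non-blank lines character by character; B instead folds over all non-blank lines, intersecting their leading space/tab runs into a running longest-common-prefix.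
import Mathlib
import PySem

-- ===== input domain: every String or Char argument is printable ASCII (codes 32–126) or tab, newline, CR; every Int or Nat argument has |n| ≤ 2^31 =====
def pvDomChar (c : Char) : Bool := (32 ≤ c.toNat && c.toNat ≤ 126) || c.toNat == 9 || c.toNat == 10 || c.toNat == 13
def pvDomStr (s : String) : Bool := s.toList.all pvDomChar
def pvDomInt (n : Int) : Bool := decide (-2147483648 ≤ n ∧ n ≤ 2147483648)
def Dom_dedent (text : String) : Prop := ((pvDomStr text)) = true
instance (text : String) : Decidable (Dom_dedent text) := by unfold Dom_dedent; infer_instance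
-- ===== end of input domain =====

-- B replaces A's lexicographic min/max-extremes margin computation by a single fold that
-- intersects the leading space/tab runs of all non-blank lines (objective: alternative).

-- ===== PORT A =====
-- the 'for margin, c in enumerate(l1): if c != l2[margin] or c not in " \t": break' loop;
-- 'c != l2[margin]' is ported via pyGet? (the out-of-range case, where Python would raise,
-- is unreachable because l1 = min and l2 = max of the same non-empty list)
def dedentMarginLoop (l2 : List Char) (margin : Int) : List (Int × Char) → Int
  | [] => margin
  | (i, c) :: rest =>
      if PySem.Chars.pyGet? l2 i != some c || !(c == ' ' || c == '\t') then i
      else dedentMarginLoop l2 i rest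

def dedent (text : String) : String :=
  let lines := PySem.Chars.splitOn text.toList ['\n']
  let nonBlank := lines.filter (fun l => !l.isEmpty && !PySem.Chars.strIsspace l)
  let l1 := PySem.List.minD nonBlank (fun x => x) []
  let l2 := PySem.List.maxD nonBlank (fun x => x) []
  let margin := dedentMarginLoop l2 0 (PySem.List.enumerate l1 0)
  String.ofList (PySem.Chars.join ['\n']
    (lines.map (fun l => if !PySem.Chars.strIsspace l then PySem.Chars.slice l (some margin) none else [])))

-- ===== PORT B =====
-- leading space/tab run of a line ('while n < len(line) and line[n] in " \t"' + 'line[:n]')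
def dedentWsRun (l : List Char) : List Char := l.takeWhile (fun c => c == ' ' || c == '\t')

-- longest common prefix of two strings (the 'while k < … and margin[k] == prefix[k]' + 'margin[:k]')
def dedentCommon : List Char → List Char → List Char
  | a :: as, b :: bs => if a == b then a :: dedentCommon as bs else []
  | _, _ => []

def dedent_alt (text : String) : String :=
  let lines := PySem.Chars.splitOn text.toList ['\n']
  let margin? := lines.foldl (fun acc l =>
      if !l.isEmpty && !PySem.Chars.strIsspace l then
        match acc with
        | none => some (dedentWsRun l)
        | some m => some (dedentCommon m (dedentWsRun l))
      else acc) none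
  let m : Nat := (margin?.getD []).length
  String.ofList (PySem.Chars.join ['\n']
    (lines.map (fun l => if PySem.Chars.strIsspace l then [] else l.drop m)))

-- ===== PRECONDITION & SPEC =====
def Spec_dedent (text : String) (out : String) : Prop := out = dedent_alt text
instance (text : String) (out : String) : Decidable (Spec_dedent text out) := by unfold Spec_dedent; infer_instance

-- ===== CLAIM (what is proved, stated in full; the proofs are below) =====
def Claim_equal_dedent : Prop := ∀ (text : String), Dom_dedent text → Spec_dedent text (dedent text)

-- ===== LEMMAS AND PROOFS =====

theorem dedentCommon_prefix_left (a b : List Char) : dedentCommon a b <+: a := by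
  induction a generalizing b with
  | nil => simp [dedentCommon]
  | cons x as ih =>
    cases b with
    | nil => simp [dedentCommon]
    | cons y bs =>
      simp only [dedentCommon]
      split
      · exact List.cons_prefix_cons.mpr ⟨rfl, ih bs⟩
      · exact List.nil_prefix

theorem dedentCommon_prefix_right (a b : List Char) : dedentCommon a b <+: b := by
  induction a generalizing b with
  | nil => simp [dedentCommon]
  | cons x as ih =>
    cases b with
    | nil => simp [dedentCommon]
    | cons y bs =>
      simp only [dedentCommon]
      split
      · rename_i h
        exact List.cons_prefix_cons.mpr ⟨(beq_iff_eq.mp h).symm ▸ rfl, ih bs⟩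
      · exact List.nil_prefix

theorem prefix_dedentCommon {p a b : List Char} (ha : p <+: a) (hb : p <+: b) :
    p <+: dedentCommon a b := by
  induction p generalizing a b with
  | nil => exact List.nil_prefix
  | cons c cs ih =>
    cases a with
    | nil => exact absurd ha (by simp)
    | cons x as =>
      cases b with
      | nil => exact absurd hb (by simp)
      | cons y bs =>
        obtain ⟨hcx, ha'⟩ := List.cons_prefix_cons.mp ha
        obtain ⟨hcy, hb'⟩ := List.cons_prefix_cons.mp hb
        subst hcx; subst hcy
        simp only [dedentCommon, BEq.rfl, if_true]
        exact List.cons_prefix_cons.mpr ⟨rfl, ih ha' hb'⟩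

theorem prefix_wsRun {p l : List Char} (hp : p <+: l)
    (hw : ∀ c ∈ p, (c == ' ' || c == '\t') = true) : p <+: dedentWsRun l := by
  induction p generalizing l with
  | nil => exact List.nil_prefix
  | cons c cs ih =>
    cases l with
    | nil => exact absurd hp (by simp)
    | cons x xs =>
      obtain ⟨hcx, hp'⟩ := List.cons_prefix_cons.mp hp
      subst hcx
      simp only [dedentWsRun, List.takeWhile]
      rw [hw c List.mem_cons_self]
      exact List.cons_prefix_cons.mpr ⟨rfl, ih hp' (fun d hd => hw d (List.mem_cons_of_mem _ hd))⟩

theorem le_cases {a b : List Char} (h : a ≤ b) : List.Lex (fun x y : Char => x < y) a b ∨ a = b := by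
  rcases lt_or_eq_of_le h with h' | h'
  · exact Or.inl h'
  · exact Or.inr h'

-- lexicographic sandwich: the common prefix of the two extremes is a prefix of anything between
theorem sandwich_prefix : ∀ (a b l : List Char), a ≤ l → l ≤ b → dedentCommon a b <+: l := by
  intro a
  induction a with
  | nil => intro b l _ _; simp [dedentCommon]
  | cons x as ih =>
    intro b l hal hlb
    cases b with
    | nil => simp [dedentCommon]
    | cons y bs =>
      by_cases hxy : x = y
      · subst hxy
        simp only [dedentCommon, BEq.rfl, if_true]
        cases l with
        | nil =>
          rcases le_cases hal with h | h
          · cases h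
          · cases h
        | cons z ls =>
          have h1 : x < z ∨ (x = z ∧ as ≤ ls) := by
            rcases le_cases hal with h | h
            · cases h with
              | rel hr => exact Or.inl hr
              | cons hc => exact Or.inr ⟨rfl, le_of_lt hc⟩
            · cases h; exact Or.inr ⟨rfl, le_refl _⟩
          have h2 : z < x ∨ (z = x ∧ ls ≤ bs) := by
            rcases le_cases hlb with h | h
            · cases h with
              | rel hr => exact Or.inl hr
              | cons hc => exact Or.inr ⟨rfl, le_of_lt hc⟩
            · cases h; exact Or.inr ⟨rfl, le_refl _⟩
          have hzx : z = x := by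
            rcases h1 with h1 | h1 <;> rcases h2 with h2 | h2
            · exact absurd h2 (lt_asymm h1)
            · exact h2.1
            · exact absurd (h1.1 ▸ h2) (lt_irrefl _)
            · exact h2.1
          subst hzx
          have has : as ≤ ls := by
            rcases h1 with h1 | h1
            · exact absurd h1 (lt_irrefl _)
            · exact h1.2
          have hls : ls ≤ bs := by
            rcases h2 with h2 | h2
            · exact absurd h2 (lt_irrefl _)
            · exact h2.2
          exact List.cons_prefix_cons.mpr ⟨rfl, ih bs ls has hls⟩
      · simp only [dedentCommon]
        rw [if_neg (by simpa using hxy)]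
        exact List.nil_prefix

-- simple recursive description of A's break index
def loopSpec : List Char → List Char → Nat
  | c :: cs, d :: ds => if c = d ∧ (c == ' ' || c == '\t') = true then 1 + loopSpec cs ds else 0
  | _, _ => 0

theorem loopSpec_eq_common (l1 l2 : List Char) :
    loopSpec l1 l2 = (dedentCommon (dedentWsRun l1) (dedentWsRun l2)).length := by
  induction l1 generalizing l2 with
  | nil => simp [loopSpec, dedentWsRun, dedentCommon]
  | cons c cs ih =>
    cases l2 with
    | nil =>
      simp only [loopSpec, dedentWsRun, List.takeWhile_nil]
      cases h : (c == ' ' || c == '\t') <;> simp [List.takeWhile, h, dedentCommon]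
    | cons d ds =>
      simp only [loopSpec, dedentWsRun, List.takeWhile]
      by_cases hcd : c = d
      · subst hcd
        cases h : (c == ' ' || c == '\t')
        · simp [dedentCommon]
        · simp [dedentCommon, ih ds, dedentWsRun, Nat.add_comm]
      · cases h : (c == ' ' || c == '\t') <;> cases h2 : (d == ' ' || d == '\t') <;>
          simp_all [dedentCommon]

theorem marginLoop_eq (l1 : List Char) : ∀ (l2 : List Char) (m s : Int), 0 ≤ s →
    (∃ c ∈ l1, (c == ' ' || c == '\t') = false) →
    dedentMarginLoop l2 m (PySem.List.enumerate l1 s) = s + loopSpec l1 (l2.drop s.toNat) := by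
  induction l1 with
  | nil => intro _ _ _ _ h; simp at h
  | cons c cs ih =>
    intro l2 m s hs h
    rw [PySem.List.enumerate_cons]
    simp only [dedentMarginLoop]
    have hget : PySem.Chars.pyGet? l2 s = l2[s.toNat]? := by
      rw [show s = ((s.toNat : Nat) : Int) by omega]
      exact PySem.List.pyGet?_natCast ..
    cases hg : l2[s.toNat]? with
    | none =>
      have hdrop : l2.drop s.toNat = [] := by
        rw [List.drop_eq_nil_iff]
        exact le_of_not_gt fun hlt => by simp [List.getElem?_eq_getElem hlt] at hg
      rw [if_pos (by rw [hget, hg]; simp), hdrop]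
      cases cs <;> simp [loopSpec]
    | some d =>
      have hlt : s.toNat < l2.length := by
        by_contra hge
        simp [List.getElem?_eq_none (le_of_not_gt fun h2 => hge h2)] at hg
      have hdrop : l2.drop s.toNat = d :: l2.drop (s.toNat + 1) := by
        rw [← List.getElem_cons_drop hlt]
        congr 1
        have := List.getElem?_eq_getElem hlt
        rw [hg] at this; exact (Option.some_inj.mp this.symm)
      rw [hdrop]
      by_cases hcd : c = d
      · subst hcd
        cases hws : (c == ' ' || c == '\t') with
        | false =>
          rw [if_pos (by rw [hget, hg]; simp)]
          simp [loopSpec, hws]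
        | true =>
          rw [if_neg (by rw [hget, hg]; simp)]
          have hex : ∃ x ∈ cs, (x == ' ' || x == '\t') = false := by
            rcases h with ⟨x, hx, hxw⟩
            rcases List.mem_cons.mp hx with rfl | hx'
            · rw [hws] at hxw; cases hxw
            · exact ⟨x, hx', hxw⟩
          rw [ih l2 s (s + 1) (by omega) hex]
          have : (s + 1).toNat = s.toNat + 1 := by omega
          rw [this]
          simp [loopSpec, hws]
          omega
      · rw [if_pos (by rw [hget, hg]; simp; exact Or.inl fun he => hcd he.symm)]
        simp [loopSpec, hcd]

-- B's fold, characterised through the filtered list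
theorem foldB_some (lines : List (List Char)) : ∀ (m0 : List Char),
    lines.foldl (fun acc l =>
      if !l.isEmpty && !PySem.Chars.strIsspace l then
        match acc with
        | none => some (dedentWsRun l)
        | some m => some (dedentCommon m (dedentWsRun l))
      else acc) (some m0)
    = some ((lines.filter (fun l => !l.isEmpty && !PySem.Chars.strIsspace l)).foldl
        (fun m l => dedentCommon m (dedentWsRun l)) m0) := by
  induction lines with
  | nil => intro m0; rfl
  | cons h t ih =>
    intro m0
    rw [List.foldl_cons, List.filter_cons]
    cases hb : (!h.isEmpty && !PySem.Chars.strIsspace h) with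
    | false =>
      simp only [Bool.false_eq_true, if_false]
      exact ih m0
    | true =>
      simp only [if_true]
      rw [List.foldl_cons]
      exact ih _

theorem foldB_none (lines : List (List Char)) :
    lines.foldl (fun acc l =>
      if !l.isEmpty && !PySem.Chars.strIsspace l then
        match acc with
        | none => some (dedentWsRun l)
        | some m => some (dedentCommon m (dedentWsRun l))
      else acc) none
    = (match lines.filter (fun l => !l.isEmpty && !PySem.Chars.strIsspace l) with
       | [] => none
       | h :: t => some (t.foldl (fun m l => dedentCommon m (dedentWsRun l)) (dedentWsRun h))) := by
  induction lines with
  | nil => rfl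
  | cons h t ih =>
    rw [List.foldl_cons, List.filter_cons]
    cases hb : (!h.isEmpty && !PySem.Chars.strIsspace h) with
    | false =>
      simp only [Bool.false_eq_true, if_false]
      exact ih
    | true =>
      simp only [if_true]
      exact foldB_some t (dedentWsRun h)

theorem fold_prefix_init (t : List (List Char)) : ∀ (m0 : List Char),
    t.foldl (fun m l => dedentCommon m (dedentWsRun l)) m0 <+: m0 := by
  induction t with
  | nil => intro m0; exact List.prefix_refl _
  | cons h t ih =>
    intro m0
    rw [List.foldl_cons]
    exact (ih _).trans (dedentCommon_prefix_left _ _)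

theorem fold_prefix_mem (t : List (List Char)) : ∀ (m0 : List Char),
    ∀ l ∈ t, t.foldl (fun m l => dedentCommon m (dedentWsRun l)) m0 <+: dedentWsRun l := by
  induction t with
  | nil => intro _ l hl; cases hl
  | cons h t ih =>
    intro m0 l hl
    rw [List.foldl_cons]
    rcases List.mem_cons.mp hl with rfl | hl'
    · exact (fold_prefix_init t _).trans (dedentCommon_prefix_right _ _)
    · exact ih _ l hl'

theorem fold_lb (t : List (List Char)) : ∀ (m0 q : List Char), q <+: m0 →
    (∀ l ∈ t, q <+: dedentWsRun l) →
    q <+: t.foldl (fun m l => dedentCommon m (dedentWsRun l)) m0 := by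
  induction t with
  | nil => intro m0 q h0 _; exact h0
  | cons h t ih =>
    intro m0 q h0 hq
    rw [List.foldl_cons]
    exact ih _ q (prefix_dedentCommon h0 (hq h List.mem_cons_self)) (fun l hl => hq l (List.mem_cons_of_mem _ hl))

theorem min?_inst_bridge (xs : List (List Char)) :
    PySem.List.min? xs (fun x => x) = @PySem.List.min? _ _ LinearOrder.toPartialOrder.toLT LinearOrder.toDecidableLT xs (fun x => x) := by
  congr 1

theorem max?_inst_bridge (xs : List (List Char)) :
    PySem.List.max? xs (fun x => x) = @PySem.List.max? _ _ LinearOrder.toPartialOrder.toLT LinearOrder.toDecidableLT xs (fun x => x) := by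
  congr 1

theorem nonblank_has_nonws {l : List Char} (h : (!l.isEmpty && !PySem.Chars.strIsspace l) = true) :
    ∃ c ∈ l, (c == ' ' || c == '\t') = false := by
  have hp : l.isEmpty = false ∧ PySem.Chars.strIsspace l = false := by simpa using h
  have hall : l.all PySem.Chars.isspace = false := by
    simpa [PySem.Chars.strIsspace, hp.1] using hp.2
  obtain ⟨c, hc, hcs⟩ : ∃ x ∈ l, ¬ PySem.Chars.isspace x = true := by simpa using hall
  refine ⟨c, hc, ?_⟩
  cases hb : (c == ' ' || c == '\t') with
  | false => rfl
  | true =>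
    exfalso
    rcases (by simpa using hb : c = ' ' ∨ c = '\t') with hb' | hb' <;>
      · rw [hb'] at hcs; exact hcs (by decide)

-- the heart: A's margin index equals the length of B's fold result
theorem margin_eq (lines : List (List Char)) :
    dedentMarginLoop
      (PySem.List.maxD (lines.filter (fun l => !l.isEmpty && !PySem.Chars.strIsspace l)) (fun x => x) [])
      0
      (PySem.List.enumerate
        (PySem.List.minD (lines.filter (fun l => !l.isEmpty && !PySem.Chars.strIsspace l)) (fun x => x) []) 0)
    = (((lines.foldl (fun acc l =>
          if !l.isEmpty && !PySem.Chars.strIsspace l then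
            match acc with
            | none => some (dedentWsRun l)
            | some m => some (dedentCommon m (dedentWsRun l))
          else acc) none).getD []).length : Int) := by
  rw [foldB_none]
  cases hNB : lines.filter (fun l => !l.isEmpty && !PySem.Chars.strIsspace l) with
  | nil => rfl
  | cons hd tl =>
    have hmem_nb : ∀ l ∈ hd :: tl, (!l.isEmpty && !PySem.Chars.strIsspace l) = true := by
      intro l hl; rw [← hNB] at hl; exact (List.mem_filter.mp hl).2
    obtain ⟨m1, hm1⟩ : ∃ m, PySem.List.min? (hd :: tl) (fun x => x) = some m := by
      cases hx : PySem.List.min? (hd :: tl) (fun x => x) with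
      | none => exact absurd ((PySem.List.min?_eq_none_iff _ _).mp hx) (by simp)
      | some m => exact ⟨m, rfl⟩
    obtain ⟨m2, hm2⟩ : ∃ m, PySem.List.max? (hd :: tl) (fun x => x) = some m := by
      cases hx : PySem.List.max? (hd :: tl) (fun x => x) with
      | none => exact absurd ((PySem.List.max?_eq_none_iff _ _).mp hx) (by simp)
      | some m => exact ⟨m, rfl⟩
    have hm1mem : m1 ∈ hd :: tl := PySem.List.min?_mem hm1
    have hm2mem : m2 ∈ hd :: tl := PySem.List.max?_mem hm2
    have hmin : ∀ y ∈ hd :: tl, m1 ≤ y := by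
      rw [min?_inst_bridge] at hm1
      exact fun y hy => PySem.List.min?_isMin hm1 y hy
    have hmax : ∀ y ∈ hd :: tl, y ≤ m2 := by
      rw [max?_inst_bridge] at hm2
      exact fun y hy => PySem.List.max?_isMax hm2 y hy
    have hminD : PySem.List.minD (hd :: tl) (fun x => x) [] = m1 := by
      simp [PySem.List.minD, hm1]
    have hmaxD : PySem.List.maxD (hd :: tl) (fun x => x) [] = m2 := by
      simp [PySem.List.maxD, hm2]
    rw [hminD, hmaxD,
      marginLoop_eq m1 m2 0 0 le_rfl (nonblank_has_nonws (hmem_nb m1 hm1mem)),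
      loopSpec_eq_common]
    -- Q = common ws prefix of the extremes; P = B's fold over all non-blank lines
    have hQl : ∀ l ∈ hd :: tl,
        dedentCommon (dedentWsRun m1) (dedentWsRun m2) <+: dedentWsRun l := by
      intro l hl
      have h1 : dedentCommon (dedentWsRun m1) (dedentWsRun m2) <+: dedentCommon m1 m2 :=
        prefix_dedentCommon
          ((dedentCommon_prefix_left _ _).trans (List.takeWhile_prefix _))
          ((dedentCommon_prefix_right _ _).trans (List.takeWhile_prefix _))
      have h2 : dedentCommon m1 m2 <+: l := sandwich_prefix m1 m2 l (hmin l hl) (hmax l hl)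
      have hQw : ∀ c ∈ dedentCommon (dedentWsRun m1) (dedentWsRun m2),
          (c == ' ' || c == '\t') = true := by
        intro c hc
        have hcm : c ∈ List.takeWhile (fun c => c == ' ' || c == '\t') m1 :=
          (dedentCommon_prefix_left _ _).sublist.subset hc
        exact @List.mem_takeWhile_imp _ (fun c => c == ' ' || c == '\t') m1 c hcm
      exact prefix_wsRun (h1.trans h2) hQw
    have hQP : dedentCommon (dedentWsRun m1) (dedentWsRun m2) <+:
        tl.foldl (fun m l => dedentCommon m (dedentWsRun l)) (dedentWsRun hd) :=
      fold_lb tl (dedentWsRun hd) _ (hQl hd List.mem_cons_self)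
        (fun l hl => hQl l (List.mem_cons_of_mem _ hl))
    have hPw : ∀ y ∈ hd :: tl,
        tl.foldl (fun m l => dedentCommon m (dedentWsRun l)) (dedentWsRun hd) <+: dedentWsRun y := by
      intro y hy
      rcases List.mem_cons.mp hy with rfl | hy'
      · exact fold_prefix_init tl _
      · exact fold_prefix_mem tl _ y hy'
    have hPQ : tl.foldl (fun m l => dedentCommon m (dedentWsRun l)) (dedentWsRun hd) <+:
        dedentCommon (dedentWsRun m1) (dedentWsRun m2) :=
      prefix_dedentCommon (hPw m1 hm1mem) (hPw m2 hm2mem)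
    have hQPeq : dedentCommon (dedentWsRun m1) (dedentWsRun m2)
        = tl.foldl (fun m l => dedentCommon m (dedentWsRun l)) (dedentWsRun hd) :=
      hQP.eq_of_length (le_antisymm hQP.length_le hPQ.length_le)
    simp [hQPeq]

-- ===== VERDICT (by name: the statement is the Claim_ definition above) =====
theorem dedent_spec : Claim_equal_dedent := by
  intro text _
  show dedent text = dedent_alt text
  unfold dedent dedent_alt
  simp only []
  rw [margin_eq]
  congr 1
  apply congrArg
  apply List.map_congr_left
  intro l _
  cases hsp : PySem.Chars.strIsspace l with
  | true => simp
  | false =>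
    simp only [Bool.not_false, if_true, Bool.false_eq_true, if_false]
    exact PySem.List.slice_from_natCast ..
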